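-- pv_equiv track=rewrite | github.com/BugTraceAI/BugTraceAI-CLI | bugtrace/tools/waf/encodings.py | _html_entity_hex
-- ===== SOURCE A (Python) =====
-- def _html_entity_hex(payload: str) -> str:
--     """
--     HTML hex entity encoding.
--     < -> &#x3c;
--     """
--     result = ""
--     for char in payload:
--         if char in '<>"\'/&':
--             result += f"&#x{ord(char):x};"
--         else:
--             result += char
--     return result
-- ===== SOURCE B (Python) =====
-- def _html_entity_hex(payload: str) -> str:
--     # Staged rewriting: one global replace pass per special character.
--     # '&' is processed first, so entities inserted later are never re-encoded.
--     for char in '&<>"\'/':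
--         payload = payload.replace(char, f"&#x{ord(char):x};")
--     return payload
-- ===== Notes on version B (the rewrite author's own statement) =====
-- stated objective: alternative
-- what changed: Replaces A's single per-character loop with a membership branch by six staged whole-string replace passes, one per special character, processing the ampersand first so entities inserted by later passes are never re-encoded.
import Mathlib
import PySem

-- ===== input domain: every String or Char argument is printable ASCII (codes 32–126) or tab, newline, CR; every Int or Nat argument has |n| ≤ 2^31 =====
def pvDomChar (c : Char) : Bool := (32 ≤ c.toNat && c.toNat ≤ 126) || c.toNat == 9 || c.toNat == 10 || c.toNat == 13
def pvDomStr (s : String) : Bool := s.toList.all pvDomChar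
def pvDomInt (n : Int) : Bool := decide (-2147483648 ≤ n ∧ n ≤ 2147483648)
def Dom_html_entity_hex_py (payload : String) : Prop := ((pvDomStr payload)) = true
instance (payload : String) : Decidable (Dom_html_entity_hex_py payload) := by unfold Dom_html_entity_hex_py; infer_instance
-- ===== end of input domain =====

-- B replaces A's single per-char loop-and-branch by six staged whole-string replace passes ('&' first so inserted entities are never re-encoded); objective: alternative algorithm, not faster.


-- ===== PORT A =====
-- f"&#x{ord(char):x};" : lowercase hex of the code point (Nat.toDigits 16 matches Python's :x for the nonnegative ord)
def html_entity_hex_py (payload : String) : String :=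
  payload.toList.foldl
    (fun result char =>
      if char ∈ ("<>\"'/&".toList) then
        result ++ ("&#x" ++ String.ofList (Nat.toDigits 16 char.toNat) ++ ";")
      else
        result ++ String.singleton char)
    ""

-- ===== PORT B =====
-- Source B: for char in '&<>"\'/': payload = payload.replace(char, f"&#x{ord(char):x};")
def html_entity_hex_py_alt (payload : String) : String :=
  ("&<>\"'/".toList).foldl
    (fun p char =>
      PySem.Str.replace p (String.singleton char)
        ("&#x" ++ String.ofList (Nat.toDigits 16 char.toNat) ++ ";"))
    payload

-- ===== PRECONDITION & SPEC =====
def Spec_html_entity_hex_py (payload : String) (out : String) : Prop := out = html_entity_hex_py_alt payload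
instance (payload : String) (out : String) : Decidable (Spec_html_entity_hex_py payload out) := by unfold Spec_html_entity_hex_py; infer_instance

-- ===== CLAIM (what is proved, stated in full; the proofs are below) =====
def Claim_equal_html_entity_hex_py : Prop := ∀ (payload : String), Dom_html_entity_hex_py payload → Spec_html_entity_hex_py payload (html_entity_hex_py payload)

-- ===== LEMMAS AND PROOFS =====

-- Single-character str.replace is a character-wise flatMap.
theorem pv_go_single (c : Char) (new : List Char) :
    ∀ (l : List Char) (fuel : Nat) (acc : List Char), l.length ≤ fuel →
      PySem.Chars.replace.go [c] new fuel l acc =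
        acc.reverse ++ l.flatMap (fun d => if d = c then new else [d]) := by
  intro l
  induction l with
  | nil =>
    intro fuel acc _
    cases fuel <;> simp [PySem.Chars.replace.go]
  | cons d t ih =>
    intro fuel acc hle
    cases fuel with
    | zero => simp at hle
    | succ f =>
      by_cases hdc : d = c
      · subst hdc
        have hb : [d].isPrefixOf (d :: t) = true := by simp [List.isPrefixOf]
        rw [show PySem.Chars.replace.go [d] new (f+1) (d :: t) acc
              = PySem.Chars.replace.go [d] new f (List.drop 1 (d :: t)) (new.reverse ++ acc) by
            simp [PySem.Chars.replace.go, hb]]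
        rw [List.drop_one, List.tail_cons, ih f (new.reverse ++ acc) (by simpa using Nat.le_of_succ_le_succ hle)]
        simp
      · have hb : [c].isPrefixOf (d :: t) = false := by
          simp [List.isPrefixOf]
          exact fun h => hdc h.symm
        rw [show PySem.Chars.replace.go [c] new (f+1) (d :: t) acc
              = PySem.Chars.replace.go [c] new f t (d :: acc) by
            simp [PySem.Chars.replace.go, hb]]
        rw [ih f (d :: acc) (by simpa using Nat.le_of_succ_le_succ hle)]
        simp [hdc]

theorem pv_replace_single (l : List Char) (c : Char) (new : List Char) :
    PySem.Chars.replace l [c] new = l.flatMap (fun d => if d = c then new else [d]) := by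
  unfold PySem.Chars.replace
  rw [if_neg (by simp)]
  simpa using pv_go_single c new l l.length [] le_rfl

-- the per-character image of A's branch
def pvImA (c : Char) : List Char :=
  if c ∈ ("<>\"'/&".toList) then
    ("&#x" ++ String.ofList (Nat.toDigits 16 c.toNat) ++ ";").toList
  else [c]

-- A's accumulator loop, character-wise
theorem pv_loopA (l : List Char) (acc : String) :
    (l.foldl
      (fun result char =>
        if char ∈ ("<>\"'/&".toList) then
          result ++ ("&#x" ++ String.ofList (Nat.toDigits 16 char.toNat) ++ ";")
        else
          result ++ String.singleton char)
      acc).toList = acc.toList ++ l.flatMap pvImA := by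
  induction l generalizing acc with
  | nil => simp
  | cons c t ih =>
    rw [List.foldl_cons, ih, List.flatMap_cons, ← List.append_assoc]
    congr 1
    unfold pvImA
    split_ifs <;> simp

-- ===== VERDICT (by name: the statement is the Claim_ definition above) =====
theorem html_entity_hex_py_spec : Claim_equal_html_entity_hex_py := by
  intro payload _
  unfold Spec_html_entity_hex_py
  apply String.toList_inj.mp
  unfold html_entity_hex_py html_entity_hex_py_alt
  rw [pv_loopA]
  simp only [show ("&<>\"'/".toList) = ['&', '<', '>', '"', '\'', '/'] from rfl, List.foldl_cons,
    List.foldl_nil, PySem.Str.toList_replace, String.toList_singleton, pv_replace_single,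
    List.flatMap_assoc]
  simp only [show ("" : String).toList = [] from rfl, List.nil_append]
  refine List.flatMap_congr ?_
  intro d _
  by_cases h1 : d = '&'; · subst h1; decide
  by_cases h2 : d = '<'; · subst h2; decide
  by_cases h3 : d = '>'; · subst h3; decide
  by_cases h4 : d = '"'; · subst h4; decide
  by_cases h5 : d = '\''; · subst h5; decide
  by_cases h6 : d = '/'; · subst h6; decide
  simp [pvImA, h1, h2, h3, h4, h5, h6]
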